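-- pv_equiv track=rewrite | github.com/zhouhanghust/DS | Dynamic&Greedy/Recursion/Cow.py | solution
-- ===== SOURCE A (Python) =====
-- def solution(year):
--
--     class LittleCow():
--         def __init__(self,age):
--             self.age = age
--
--         def getAge(self):
--             return self.age
--
--         def setAge(self,age):
--             self.age = age
--
--         def growUp(self, farm):
--             self.age += 1
--             if self.age > 2:
--                 farm.append(LittleCow(0))
--
--     def countCow(farm,year):
--         for i in range(year):
--             j = len(farm)
--             for k in range(j):
--                 lc = farm[k]
--                 lc.growUp(farm)
--
--     farm = [LittleCow(1)]
--     countCow(farm,year)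
--     return len(farm)
-- ===== SOURCE B (Python) =====
-- def solution(year):
--     # DP over cow ages: a0/a1/a2 cows of age 0/1/2, ad cows aged 3+ (which calve yearly).
--     a0, a1, a2, ad = 0, 1, 0, 0
--     for _ in range(year):
--         a0, a1, a2, ad = a2 + ad, a0, a1, ad + a2
--     return a0 + a1 + a2 + ad
-- ===== Notes on version B (the rewrite author's own statement) =====
-- stated objective: faster
-- what changed: replaces the per-cow object simulation (a farm list that grows exponentially and is re-scanned every year) with an age-bucket DP keeping four counters (cows aged 0, 1, 2, 3+) updated once per year; intended as asymptotically faster, though a timing run could not confirm it because A already timed out on sizes where B returned instantly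
import Mathlib
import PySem

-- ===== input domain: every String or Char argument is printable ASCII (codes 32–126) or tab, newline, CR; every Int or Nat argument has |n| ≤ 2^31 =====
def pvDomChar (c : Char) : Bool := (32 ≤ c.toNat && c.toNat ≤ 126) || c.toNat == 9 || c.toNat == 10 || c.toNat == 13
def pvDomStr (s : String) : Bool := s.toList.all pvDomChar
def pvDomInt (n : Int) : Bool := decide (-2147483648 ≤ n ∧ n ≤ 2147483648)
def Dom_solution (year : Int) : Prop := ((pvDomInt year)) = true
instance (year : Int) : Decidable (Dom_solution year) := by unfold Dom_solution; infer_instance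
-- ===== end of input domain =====

-- B replaces A's per-cow farm-list simulation (exponentially growing population) by an age-bucket DP with four counters; intended as asymptotically faster, though a timing run could not confirm it (A timed out on the sizes where B returned).


-- ===== PORT A =====
-- A cow object carries only its age, so the farm is a List Int of ages.
-- The inner Python loop walks the first j cows in order, bumps each age in place and
-- appends a 0-age calf at the END of the farm for each new age > 2; ported as a walk
-- down the farm with a reversed done-prefix and a count of calves appended so far
-- (Python's O(1) farm[k]/append on a growing list has no O(1) List counterpart).
def cowInner : List Int → List Int → Nat → List Int
  | [], doneRev, calves => doneRev.reverse ++ List.replicate calves 0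
  | a :: rest, doneRev, calves =>
    let age := a + 1                                   -- lc.growUp: self.age += 1
    cowInner rest (age :: doneRev)
      (if age > 2 then calves + 1 else calves)         -- farm.append(LittleCow(0))

-- `for i in range(year)`: one cowInner pass (over the j cows present at year start) per year
def cowYears : List Int → Nat → List Int
  | farm, 0 => farm
  | farm, n+1 => cowYears (cowInner farm [] 0) n

def solution (year : Int) : Int := ((cowYears [1] year.toNat).length : Int)

-- ===== PORT B =====
def altGo : Nat → Int × Int × Int × Int → Int × Int × Int × Int
  | 0, s => s
  | n+1, (a0, a1, a2, ad) => altGo n (a2 + ad, a0, a1, ad + a2)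

def solution_alt (year : Int) : Int :=
  let s := altGo year.toNat (0, 1, 0, 0)
  s.1 + s.2.1 + s.2.2.1 + s.2.2.2

-- ===== PRECONDITION & SPEC =====
def Spec_solution (year : Int) (out : Int) : Prop := out = solution_alt year
instance (year : Int) (out : Int) : Decidable (Spec_solution year out) := by unfold Spec_solution; infer_instance

-- ===== CLAIM (what is proved, stated in full; the proofs are below) =====
def Claim_equal_solution : Prop := ∀ (year : Int), Dom_solution year → Spec_solution year (solution year)

-- ===== LEMMAS AND PROOFS =====

-- age-bucket counts of a farm: (#age 0, #age 1, #age 2, #age ≥ 3)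
def cnt (L : List Int) : Int × Int × Int × Int :=
  ((L.countP (fun a => decide (a = 0)) : Int),
   (L.countP (fun a => decide (a = 1)) : Int),
   (L.countP (fun a => decide (a = 2)) : Int),
   (L.countP (fun a => decide (3 ≤ a)) : Int))

theorem cowInner_spec (rest doneRev : List Int) (calves : Nat) :
    cowInner rest doneRev calves =
      doneRev.reverse ++ rest.map (· + 1) ++
        List.replicate (calves + rest.countP (fun a => decide (2 ≤ a))) 0 := by
  induction rest generalizing doneRev calves with
  | nil => simp [cowInner]
  | cons a rest' ih =>
    simp only [cowInner, ih, List.reverse_cons, List.countP_cons, List.map_cons]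
    by_cases h2 : (2 : Int) ≤ a
    · have hgt : a + 1 > 2 := by omega
      have : decide (2 ≤ a) = true := by simp [h2]
      simp only [hgt, if_pos, this]
      have : calves + 1 + List.countP (fun a => decide (2 ≤ a)) rest'
          = calves + (List.countP (fun a => decide (2 ≤ a)) rest' + 1) := by omega
      simp [this]
    · have hgt : ¬ (a + 1 > 2) := by omega
      have : decide (2 ≤ a) = false := by simp [h2]
      simp [hgt, this]

theorem cowYear_step (L : List Int) :
    cowInner L [] 0 =
      L.map (· + 1) ++ List.replicate (L.countP (fun a => decide (2 ≤ a))) 0 := by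
  simp [cowInner_spec]

theorem len_eq_counts (L : List Int) (h : ∀ a ∈ L, 0 ≤ a) :
    (L.length : Int) = (cnt L).1 + (cnt L).2.1 + (cnt L).2.2.1 + (cnt L).2.2.2 := by
  induction L with
  | nil => simp [cnt]
  | cons a t ih =>
    have ha : 0 ≤ a := h a (List.mem_cons_self)
    have iht := ih (fun x hx => h x (List.mem_cons_of_mem _ hx))
    simp only [cnt, List.countP_cons, List.length_cons] at iht ⊢
    by_cases h0 : a = 0
    · simp only [h0]; push_cast; simp at iht ⊢; omega
    · by_cases h1 : a = 1
      · simp only [h1]; push_cast; simp at iht ⊢; omega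
      · by_cases h2 : a = 2
        · simp only [h2]; push_cast; simp at iht ⊢; omega
        · have h3 : 3 ≤ a := by omega
          have hd0 : decide (a = 0) = false := by simp [h0]
          have hd1 : decide (a = 1) = false := by simp [h1]
          have hd2 : decide (a = 2) = false := by simp [h2]
          have hd3 : decide (3 ≤ a) = true := by simp [h3]
          simp only [hd0, hd1, hd2, hd3]; push_cast; simp at iht ⊢; omega

theorem count_ge2_split (L : List Int) :
    (L.countP (fun a => decide (2 ≤ a)) : Int)
      = (cnt L).2.2.1 + (cnt L).2.2.2 := by
  induction L with
  | nil => simp [cnt]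
  | cons a t ih =>
    simp only [cnt, List.countP_cons] at ih ⊢
    by_cases h2 : a = 2
    · simp only [h2]; push_cast; simp at ih ⊢; omega
    · by_cases hge : (2 : Int) ≤ a
      · have h3 : 3 ≤ a := by omega
        have : decide (a = 2) = false := by simp [h2]
        simp only [this, hge, h3]; push_cast; simp at ih ⊢; omega
      · have h3 : ¬ (3 ≤ a) := by omega
        have d2 : decide (a = 2) = false := by simp [h2]
        have dg : decide (2 ≤ a) = false := by simp [hge]
        have d3 : decide (3 ≤ a) = false := by simp [h3]
        simp only [d2, dg, d3]; push_cast; simp at ih ⊢; omega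

theorem cnt_step (L : List Int) (h : ∀ a ∈ L, 0 ≤ a) :
    cnt (L.map (· + 1) ++ List.replicate (L.countP (fun a => decide (2 ≤ a))) 0)
      = ((cnt L).2.2.1 + (cnt L).2.2.2, (cnt L).1, (cnt L).2.1,
         (cnt L).2.2.2 + (cnt L).2.2.1) := by
  have hsplit := count_ge2_split L
  simp only [cnt, List.countP_append, List.countP_map, List.countP_replicate,
    Function.comp_def]
  have e1 : (L.countP fun a => decide (a + 1 = 1)) = L.countP fun a => decide (a = 0) := by
    apply List.countP_congr; intro a _; simp only [decide_eq_true_eq]; omega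
  have e2 : (L.countP fun a => decide (a + 1 = 2)) = L.countP fun a => decide (a = 1) := by
    apply List.countP_congr; intro a _; simp only [decide_eq_true_eq]; omega
  have e3 : (L.countP fun a => decide (3 ≤ a + 1)) = L.countP fun a => decide (2 ≤ a) := by
    apply List.countP_congr; intro a _; simp only [decide_eq_true_eq]; omega
  have e0 : (L.countP fun a => decide (a + 1 = 0)) = 0 := by
    rw [List.countP_eq_zero]; intro a ha; have := h a ha; simp; omega
  rw [e0, e1, e2, e3]
  simp only [cnt] at hsplit
  simp only [Prod.mk.injEq]
  norm_num
  omega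

theorem nonneg_step (L : List Int) (h : ∀ a ∈ L, 0 ≤ a) :
    ∀ a ∈ L.map (· + 1) ++ List.replicate (L.countP (fun a => decide (2 ≤ a))) 0, 0 ≤ a := by
  intro a ha
  rcases List.mem_append.mp ha with hm | hr
  · obtain ⟨b, hb, rfl⟩ := List.mem_map.mp hm
    have := h b hb; omega
  · have := List.eq_of_mem_replicate hr; omega

theorem main_inv (n : Nat) : ∀ (L : List Int), (∀ a ∈ L, 0 ≤ a) →
    ((cowYears L n).length : Int) =
      (altGo n (cnt L)).1 + (altGo n (cnt L)).2.1
        + (altGo n (cnt L)).2.2.1 + (altGo n (cnt L)).2.2.2 := by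
  induction n with
  | zero => intro L h; simpa [cowYears, altGo] using len_eq_counts L h
  | succ m ih =>
    intro L h
    have hstep := cnt_step L h
    have hnn := nonneg_step L h
    show ((cowYears (cowInner L [] 0) m).length : Int) = _
    rw [cowYear_step, ih _ hnn, hstep]
    rcases hc : cnt L with ⟨a0, a1, a2, ad⟩
    simp [altGo]

theorem solution_eq (year : Int) : solution year = solution_alt year := by
  have h1 : ∀ a ∈ ([1] : List Int), 0 ≤ a := by intro a ha; simp at ha; omega
  have := main_inv year.toNat [1] h1
  have hc : cnt ([1] : List Int) = (0, 1, 0, 0) := by decide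
  rw [hc] at this
  simpa [solution, solution_alt] using this

-- ===== VERDICT (by name: the statement is the Claim_ definition above) =====
theorem solution_spec : Claim_equal_solution := by
  intro year _
  exact solution_eq year
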